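-- pv_equiv track=rewrite | github.com/melroy999/2IMP00-SLCO | RaceConditionExplorer/python/refiner.py | cmc_find_direct_path_actions
-- ===== SOURCE A (Python) =====
-- ACCEPT = 'accept'
--
-- def peek(stack):
-- 	"""Return but do not pop top element of stack"""
-- 	return stack[len(stack)-1]
--
-- def cmc_find_direct_path_actions(h,v):
-- 	"""find and return (a subset of) the set of actions on cycle-free paths leading to accepting states in v"""
-- 	directactions = set([])
--
-- 	# call stack
-- 	callstack = []
-- 	callstackset = set([])
--
-- 	# set of states of which we know that a simple path to an accepting state exists
-- 	closed_simple_states = set([])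
-- 	closed = set([])
-- 	# keep track of whether we are adding actions in each state
-- 	adding = set([])
--
-- 	# insert initial state
-- 	out = v.get(h[0],{})
-- 	targets = []
-- 	for a, tgts in out.items():
-- 		for tgt in tgts:
-- 			targets.append((a,tgt))
-- 	callstack.append([h[0], targets])
-- 	callstackset.add(h[0])
-- 	backtracking_mode = False
-- 	# search as long as there are states to be explored
-- 	while len(callstack) > 0:
-- 		[s, trans] = peek(callstack)
-- 		while len(trans) > 0:
-- 			(a,t) = peek(trans)
-- 			# add successor to call stack, if it has not been explored or on the call stack already
-- 			if t not in callstackset and t not in closed and not backtracking_mode: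
-- 				targets = []
-- 				out = v.get(t,{})
-- 				for a, tgts in out.items():
-- 					for tgt in tgts:
-- 						targets.append((a,tgt))
-- 				callstack.append([t, targets])
-- 				callstackset.add(t)
-- 				break
-- 			if t in closed_simple_states:
-- 				adding.add(s)
-- 				directactions.add(a)
-- 			# if a is an ACCEPT action, the current state has trivially a path to an accepting state
-- 			elif a == ACCEPT:
-- 				adding.add(s)
-- 			trans.pop()
-- 			if backtracking_mode:
-- 				backtracking_mode = False
-- 		if len(trans) == 0:
-- 			if s in adding:
-- 				adding.remove(s)
-- 				closed_simple_states.add(s)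
-- 			closed.add(s)
-- 			callstack.pop()
-- 			callstackset.remove(s)
-- 			backtracking_mode = True
-- 	return directactions
-- ===== SOURCE B (Python) =====
-- ACCEPT = 'accept'
--
-- def cmc_find_direct_path_actions(h, v):
-- 	"""find and return (a subset of) the set of actions on cycle-free paths leading to accepting states in v"""
-- 	directactions = set()
-- 	closed = set()
-- 	closed_simple_states = set()
-- 	adding = set()
-- 	onstack = set()
--
-- 	def visit(s):
-- 		targets = [(a, tgt) for a, tgts in v.get(s, {}).items() for tgt in tgts]
-- 		for a, t in reversed(targets):
-- 			if t not in onstack and t not in closed: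
-- 				onstack.add(t)
-- 				visit(t)
-- 			if t in closed_simple_states:
-- 				adding.add(s)
-- 				directactions.add(a)
-- 			elif a == ACCEPT:
-- 				adding.add(s)
-- 		if s in adding:
-- 			adding.discard(s)
-- 			closed_simple_states.add(s)
-- 		closed.add(s)
-- 		onstack.discard(s)
--
-- 	onstack.add(h[0])
-- 	visit(h[0])
-- 	return directactions
-- ===== Notes on version B (the rewrite author's own statement) =====
-- stated objective: simpler
-- what changed: A's explicit-stack DFS (call stack of [state, transitions] frames, a separate stack-membership set and a backtracking_mode flag) is rewritten as a plain recursive helper visit(s) over the same shared sets, iterating each state's transitions in reverse to replay A's LIFO pop order.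
import Mathlib
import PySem

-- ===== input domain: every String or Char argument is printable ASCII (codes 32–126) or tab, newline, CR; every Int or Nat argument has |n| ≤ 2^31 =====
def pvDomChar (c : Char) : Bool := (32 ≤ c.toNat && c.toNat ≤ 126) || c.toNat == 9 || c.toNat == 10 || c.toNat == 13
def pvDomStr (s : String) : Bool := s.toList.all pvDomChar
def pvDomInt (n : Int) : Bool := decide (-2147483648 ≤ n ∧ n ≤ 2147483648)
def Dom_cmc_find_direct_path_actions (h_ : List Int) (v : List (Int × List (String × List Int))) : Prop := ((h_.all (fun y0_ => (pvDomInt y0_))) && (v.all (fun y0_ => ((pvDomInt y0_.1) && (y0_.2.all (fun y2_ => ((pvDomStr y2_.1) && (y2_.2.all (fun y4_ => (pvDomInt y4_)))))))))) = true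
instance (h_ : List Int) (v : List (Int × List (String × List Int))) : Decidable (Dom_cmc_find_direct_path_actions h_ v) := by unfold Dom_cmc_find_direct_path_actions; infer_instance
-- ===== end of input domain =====

-- B re-implements A's explicit-stack DFS (frame stack + backtracking flag) as a plain recursive
-- helper visit(s) over the same shared sets; same values, same cost — objective: simpler.

-- Shared state: the five Python sets both programs maintain
-- (directactions : set[str]; closed_simple_states, closed, adding, callstack/onstack set : set[int]).
structure PvSt where
  dir : PySem.Set String
  csimp : PySem.Set Int
  cls : PySem.Set Int
  add : PySem.Set Int
  ons : PySem.Set Int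
  deriving Repr, DecidableEq

def pvACCEPT : String := "accept"

-- targets = [] ; for a, tgts in v.get(s, {}).items(): for tgt in tgts: targets.append((a, tgt))
-- (identical lines in A and in Source B's comprehension)
def pvTargets (v : List (Int × List (String × List Int))) (s : Int) : List (String × Int) :=
  ((PySem.Dict.mk v).getD s []).foldl
    (fun acc p => p.2.foldl (fun acc2 t => acc2 ++ [(p.1, t)]) acc) []

-- the shared transition bookkeeping: if t in closed_simple_states: adding.add(s); directactions.add(a)
-- elif a == ACCEPT: adding.add(s)   (identical lines in A and B)
def pvHandle (σ : PvSt) (s : Int) (a : String) (t : Int) : PvSt :=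
  if t ∈ σ.csimp then { σ with add := PySem.Set.add σ.add s, dir := PySem.Set.add σ.dir a }
  else if a = pvACCEPT then { σ with add := PySem.Set.add σ.add s }
  else σ

-- closing a state: if s in adding: adding.remove(s); closed_simple_states.add(s);  closed.add(s);
-- remove s from the stack set (A: callstackset.remove(s); B: onstack.discard(s) — s is a member, so both are discard).
def pvClose (s : Int) (σ : PvSt) : PvSt :=
  let σ1 := if s ∈ σ.add
    then { σ with add := PySem.Set.discard σ.add s, csimp := PySem.Set.add σ.csimp s }
    else σ
  { σ1 with cls := PySem.Set.add σ1.cls s, ons := PySem.Set.discard σ1.ons s }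

-- ===== PORT A =====
-- result of A's inner `while len(trans) > 0` loop: either a new frame is pushed (break) or trans is exhausted
inductive PvInnerRes where
  | push : Int → List (String × Int) → PvSt → PvInnerRes
  | done : PvSt → PvInnerRes
  deriving Repr, DecidableEq

-- A's inner loop: (a, t) = peek(trans) (= last element); push-or-break, else handle and trans.pop()
def pvInnerA (s : Int) (trans : List (String × Int)) (σ : PvSt) (bt : Bool) : PvInnerRes :=
  match hpk : trans.getLast? with   -- (a, t) = peek(trans); none ↔ len(trans) == 0
  | none => .done σ
  | some (a, t) =>
    if t ∉ σ.ons ∧ t ∉ σ.cls ∧ bt = false then .push t trans σ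
    else pvInnerA s trans.dropLast (pvHandle σ s a t) false
  termination_by trans.length
  decreasing_by
    have : trans ≠ [] := by intro h; rw [h] at hpk; simp at hpk
    cases trans with
    | nil => exact absurd rfl this
    | cons x xs => simp

-- A's outer `while len(callstack) > 0` loop; fuel only makes the recursion structural (never exhausted
-- for the fuel supplied at the entry point, as the proof shows)
def pvMachA (v : List (Int × List (String × List Int))) :
    Nat → List (Int × List (String × Int)) → PvSt → Bool → List String
  | _, [], σ, _ => σ.dir
  | 0, _ :: _, σ, _ => σ.dir
  | fuel + 1, (s, tr) :: rest, σ, bt =>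
    match pvInnerA s tr σ bt with
    | .push t trans' σ' =>
      pvMachA v fuel ((t, pvTargets v t) :: (s, trans') :: rest)
        { σ' with ons := PySem.Set.add σ'.ons t } false
    | .done σ' => pvMachA v fuel rest (pvClose s σ') true

-- all ints that can ever be pushed (h[0] and every transition target); only used to size the fuel
def pvStateU (h_ : List Int) (v : List (Int × List (String × List Int))) : List Int :=
  h_ ++ v.flatMap (fun kv => kv.2.flatMap (fun p => p.2))

def cmc_find_direct_path_actions (h_ : List Int) (v : List (Int × List (String × List Int))) : List String :=
  match PySem.List.pyGet? h_ 0 with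
  | none => []   -- h[0] raises IndexError: excluded by Pre_
  | some s0 =>
    pvMachA v (2 * (pvStateU h_ v).length + 2)
      [(s0, pvTargets v s0)]
      ⟨PySem.Set.empty, PySem.Set.empty, PySem.Set.empty, PySem.Set.empty,
        PySem.Set.add PySem.Set.empty s0⟩ false

-- ===== PORT B =====
-- Source B's recursive visit(s): for a, t in reversed(targets): maybe recurse, then handle; finally close s.
-- Fuel only makes the recursion structural (never exhausted for the fuel supplied at the entry point).
mutual
def pvVisitB (v : List (Int × List (String × List Int))) : Nat → Int → PvSt → PvSt
  | 0, _, σ => σ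
  | fuel + 1, s, σ => pvClose s (pvGoB v fuel s (pvTargets v s).reverse σ)
  termination_by fuel s σ => (fuel, 0)

def pvGoB (v : List (Int × List (String × List Int))) :
    Nat → Int → List (String × Int) → PvSt → PvSt
  | _, _, [], σ => σ
  | fuel, s, (a, t) :: rest, σ =>
    let σ1 := if t ∉ σ.ons ∧ t ∉ σ.cls
      then pvVisitB v fuel t { σ with ons := PySem.Set.add σ.ons t } else σ
    pvGoB v fuel s rest (pvHandle σ1 s a t)
  termination_by fuel s l σ => (fuel, l.length + 1)
end

def cmc_find_direct_path_actions_alt (h_ : List Int) (v : List (Int × List (String × List Int))) : List String :=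
  match PySem.List.pyGet? h_ 0 with
  | none => []   -- h[0] raises IndexError: excluded by Pre_
  | some s0 =>
    (pvVisitB v ((pvStateU h_ v).length + 1) s0
      ⟨PySem.Set.empty, PySem.Set.empty, PySem.Set.empty, PySem.Set.empty,
        PySem.Set.add PySem.Set.empty s0⟩).dir

-- ===== PRECONDITION & SPEC =====
-- Pre_ excludes only h = [], where both Pythons raise IndexError on h[0].
def Pre_cmc_find_direct_path_actions (h_ : List Int) (v : List (Int × List (String × List Int))) : Prop :=
  h_ ≠ []
instance (h_ : List Int) (v : List (Int × List (String × List Int))) : Decidable (Pre_cmc_find_direct_path_actions h_ v) := by unfold Pre_cmc_find_direct_path_actions; infer_instance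
def pvWitness_cmc_find_direct_path_actions : List Int × (List (Int × List (String × List Int))) :=
  ([0], [(0, [("accept", [0])])])

def Spec_cmc_find_direct_path_actions (h_ : List Int) (v : List (Int × List (String × List Int))) (out : List String) : Prop := out = cmc_find_direct_path_actions_alt h_ v
instance (h_ : List Int) (v : List (Int × List (String × List Int))) (out : List String) : Decidable (Spec_cmc_find_direct_path_actions h_ v out) := by unfold Spec_cmc_find_direct_path_actions; infer_instance

-- ===== CLAIM (what is proved, stated in full; the proofs are below) =====
def Claim_equal_cmc_find_direct_path_actions : Prop := ∀ (h_ : List Int) (v : List (Int × List (String × List Int))), Dom_cmc_find_direct_path_actions h_ v → Pre_cmc_find_direct_path_actions h_ v → Spec_cmc_find_direct_path_actions h_ v (cmc_find_direct_path_actions h_ v)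


-- ===== LEMMAS AND PROOFS =====

-- ---- basic facts about the shared helpers ----
theorem pvHandle_ons (σ : PvSt) (s : Int) (a : String) (t : Int) : (pvHandle σ s a t).ons = σ.ons := by
  unfold pvHandle; split_ifs <;> rfl

theorem pvHandle_cls (σ : PvSt) (s : Int) (a : String) (t : Int) : (pvHandle σ s a t).cls = σ.cls := by
  unfold pvHandle; split_ifs <;> rfl

theorem pvClose_cls (s : Int) (σ : PvSt) : (pvClose s σ).cls = PySem.Set.add σ.cls s := by
  unfold pvClose; split_ifs <;> rfl

theorem pvClose_ons (s : Int) (σ : PvSt) : (pvClose s σ).ons = PySem.Set.discard σ.ons s := by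
  unfold pvClose; split_ifs <;> rfl

theorem pv_mem_add_self {s : PySem.Set Int} {x : Int} : x ∈ PySem.Set.add s x := by
  rw [PySem.Set.mem_add]; exact Or.inr rfl

-- ---- the pool: states that can still be pushed ----
def pvPool (U : List Int) (σ : PvSt) : Nat :=
  (U.filter (fun t => decide (t ∉ σ.ons ∧ t ∉ σ.cls))).length

theorem pvPool_congr {U : List Int} {σ σ' : PvSt} (hons : σ'.ons = σ.ons) (hcls : σ'.cls = σ.cls) :
    pvPool U σ' = pvPool U σ := by
  unfold pvPool; rw [hons, hcls]

theorem pvPool_mono_pointwise {U : List Int} {σ σ' : PvSt}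
    (h : ∀ x : Int, x ∈ σ.ons ∨ x ∈ σ.cls → x ∈ σ'.ons ∨ x ∈ σ'.cls) :
    pvPool U σ' ≤ pvPool U σ := by
  unfold pvPool
  rw [← List.countP_eq_length_filter, ← List.countP_eq_length_filter]
  refine List.countP_mono_left (fun x _ hx => ?_)
  simp only [decide_eq_true_eq] at hx ⊢
  constructor
  · intro hmem
    rcases h x (Or.inl hmem) with hc | hc
    · exact hx.1 hc
    · exact hx.2 hc
  · intro hmem
    rcases h x (Or.inr hmem) with hc | hc
    · exact hx.1 hc
    · exact hx.2 hc

theorem pvPool_close_le (U : List Int) (s : Int) (σ : PvSt) :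
    pvPool U (pvClose s σ) ≤ pvPool U σ := by
  refine pvPool_mono_pointwise (fun x hx => ?_)
  rw [pvClose_ons, pvClose_cls, PySem.Set.mem_discard, PySem.Set.mem_add]
  rcases hx with hx | hx
  · by_cases hxs : x = s
    · exact Or.inr (Or.inr hxs)
    · exact Or.inl ⟨hx, hxs⟩
  · exact Or.inr (Or.inl hx)

theorem pvPool_add_lt {U : List Int} {σ : PvSt} {t : Int}
    (hU : t ∈ U) (h1 : t ∉ σ.ons) (h2 : t ∉ σ.cls) :
    pvPool U { σ with ons := PySem.Set.add σ.ons t } < pvPool U σ := by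
  unfold pvPool
  have hsub : List.filter (fun x => decide (x ∉ PySem.Set.add σ.ons t ∧ x ∉ σ.cls)) U
      = List.filter (fun x => decide (x ≠ t))
          (List.filter (fun x => decide (x ∉ σ.ons ∧ x ∉ σ.cls)) U) := by
    rw [List.filter_filter]
    refine List.filter_congr (fun x _ => ?_)
    simp only [PySem.Set.mem_add, decide_eq_true_eq, Bool.and_eq_true]
    by_cases hxo : x ∈ σ.ons <;> by_cases hxc : x ∈ σ.cls <;> by_cases hxt : x = t <;>
      simp [hxo, hxc, hxt]
  rw [hsub]
  exact List.length_filter_lt_length_iff_exists.mpr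
    ⟨t, List.mem_filter.mpr ⟨hU, by simp [h1, h2]⟩, by simp⟩

-- ---- pvTargets characterisation and the state universe ----
theorem pvTargets_eq (v : List (Int × List (String × List Int))) (s : Int) :
    pvTargets v s =
      ((PySem.Dict.mk v).getD s []).flatMap (fun p => p.2.map (fun t => (p.1, t))) := by
  unfold pvTargets
  have h : ∀ (l : List (String × List Int)) (acc : List (String × Int)),
      l.foldl (fun acc p => p.2.foldl (fun acc2 t => acc2 ++ [(p.1, t)]) acc) acc
        = acc ++ l.flatMap (fun p => p.2.map (fun t => (p.1, t))) := by
    intro l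
    induction l with
    | nil => intro acc; simp
    | cons p rest ih =>
      intro acc
      rw [List.foldl_cons, ih, PySem.List.foldl_append_singleton_eq_map]
      simp
  rw [h]; simp

theorem pv_getD_mk_mem {v : List (Int × List (String × List Int))} {s : Int}
    {p : String × List Int} (hp : p ∈ (PySem.Dict.mk v).getD s []) :
    ∃ k l, (k, l) ∈ v ∧ p ∈ l := by
  induction v with
  | nil =>
    rw [PySem.Dict.getD_eq_get?_getD] at hp
    simp [PySem.Dict.get?] at hp
  | cons kv rest ih =>
    rw [PySem.Dict.getD_eq_get?_getD] at hp
    rcases kv with ⟨k0, l0⟩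
    rw [PySem.Dict.get?_mk_cons] at hp
    by_cases hk : k0 == s
    · rw [if_pos hk] at hp
      simp at hp
      exact ⟨k0, l0, by simp, hp⟩
    · rw [if_neg hk] at hp
      rw [← PySem.Dict.getD_eq_get?_getD] at hp
      rcases ih hp with ⟨k, l, hkl, hpl⟩
      exact ⟨k, l, List.mem_cons_of_mem _ hkl, hpl⟩

theorem pv_targets_mem_U (h_ : List Int) (v : List (Int × List (String × List Int)))
    (s : Int) (a : String) (t : Int) (h : (a, t) ∈ pvTargets v s) :
    t ∈ pvStateU h_ v := by
  rw [pvTargets_eq] at h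
  rcases List.mem_flatMap.mp h with ⟨p, hp, hmem⟩
  rcases List.mem_map.mp hmem with ⟨t0, ht0, heq⟩
  cases heq
  rcases pv_getD_mk_mem hp with ⟨k, l, hkl, hpl⟩
  unfold pvStateU
  refine List.mem_append_right _ ?_
  exact List.mem_flatMap.mpr ⟨(k, l), hkl, List.mem_flatMap.mpr ⟨p, hpl, ht0⟩⟩

-- ---- A's inner loop, read from the head of the reversed list ----
def pvInnerA' (s : Int) : List (String × Int) → PvSt → Bool → PvInnerRes
  | [], σ, _ => .done σ
  | (a, t) :: rest, σ, bt =>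
    if t ∉ σ.ons ∧ t ∉ σ.cls ∧ bt = false then .push t ((a, t) :: rest) σ
    else pvInnerA' s rest (pvHandle σ s a t) false

theorem pvInnerA_rev (s : Int) : ∀ (tr : List (String × Int)) (σ : PvSt) (bt : Bool),
    pvInnerA s tr σ bt =
      match pvInnerA' s tr.reverse σ bt with
      | .done σ' => .done σ'
      | .push t l' σ' => .push t l'.reverse σ' := by
  intro tr
  induction tr using List.reverseRecOn with
  | nil => intro σ bt; simp [pvInnerA, pvInnerA']
  | append_singleton xs x ih =>
    intro σ bt
    rcases x with ⟨a, t⟩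
    rw [pvInnerA.eq_def]
    split
    next hpk => rw [List.getLast?_concat] at hpk; exact absurd hpk (by simp)
    next a1 t1 hpk =>
      rw [List.getLast?_concat] at hpk
      obtain ⟨rfl, rfl⟩ : a = a1 ∧ t = t1 := by
        have := hpk
        simp only [Option.some.injEq, Prod.mk.injEq] at this
        exact ⟨this.1, this.2⟩
      simp only [List.dropLast_concat, List.reverse_append, List.reverse_cons,
        List.reverse_nil, List.nil_append, List.singleton_append]
      rw [pvInnerA']
      split_ifs with hg
      · simp
      · rw [ih]

-- ---- the reversed-list form of A's machine ----
def pvMachA' (v : List (Int × List (String × List Int))) :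
    Nat → List (Int × List (String × Int)) → PvSt → Bool → List String
  | _, [], σ, _ => σ.dir
  | 0, _ :: _, σ, _ => σ.dir
  | fuel + 1, (s, l) :: rest, σ, bt =>
    match pvInnerA' s l σ bt with
    | .push t l' σ' =>
      pvMachA' v fuel ((t, (pvTargets v t).reverse) :: (s, l') :: rest)
        { σ' with ons := PySem.Set.add σ'.ons t } false
    | .done σ' => pvMachA' v fuel rest (pvClose s σ') true

def pvMapRev (frames : List (Int × List (String × Int))) : List (Int × List (String × Int)) :=
  frames.map (fun p => (p.1, p.2.reverse))

theorem pvMachA_eq (v : List (Int × List (String × List Int))) :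
    ∀ (fuel : Nat) (frames : List (Int × List (String × Int))) (σ : PvSt) (bt : Bool),
    pvMachA v fuel frames σ bt = pvMachA' v fuel (pvMapRev frames) σ bt := by
  intro fuel
  induction fuel with
  | zero => intro frames σ bt; cases frames <;> rfl
  | succ f ih =>
    intro frames σ bt
    cases frames with
    | nil => rfl
    | cons fr rest =>
      rcases fr with ⟨s, tr⟩
      show pvMachA v (f+1) ((s, tr) :: rest) σ bt = _
      rw [pvMachA, pvInnerA_rev]
      cases hres : pvInnerA' s tr.reverse σ bt with
      | done σ' =>
        simp only []
        rw [ih]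
        show _ = pvMachA' v (f+1) ((s, tr.reverse) :: pvMapRev rest) σ bt
        rw [pvMachA', hres]
      | push t l' σ' =>
        simp only []
        rw [ih]
        show _ = pvMachA' v (f+1) ((s, tr.reverse) :: pvMapRev rest) σ bt
        rw [pvMachA', hres]
        show pvMachA' v f (pvMapRev ((t, pvTargets v t) :: (s, l'.reverse) :: rest)) _ _ = _
        unfold pvMapRev
        simp

-- ---- B's recursion folded over the remaining call stack ----
def pvContB (v : List (Int × List (String × List Int))) :
    Nat → List (Int × List (String × Int)) → PvSt → PvSt
  | _, [], σ => σ
  | F, (s, l) :: rest, σ => pvContB v (F + 1) rest (pvClose s (pvGoB v F s l σ))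

-- ---- invariants of A's call stack ----
def pvInvT (U : List Int) (frames : List (Int × List (String × Int))) : Prop :=
  ∀ sl ∈ frames, ∀ a t, (a, t) ∈ sl.2 → t ∈ U

def pvChain : List (Int × List (String × Int)) → Prop
  | [] => True
  | [_] => True
  | (s1, _) :: (s2, l2) :: rest => (∃ a l', l2 = (a, s1) :: l') ∧ pvChain ((s2, l2) :: rest)

def pvBtHead (σ : PvSt) (bt : Bool) (l : List (String × Int)) : Prop :=
  bt = true → l = [] ∨ ∃ a t l', l = (a, t) :: l' ∧ t ∈ σ.cls

def pvBtInv (σ : PvSt) (bt : Bool) : List (Int × List (String × Int)) → Prop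
  | [] => True
  | (_, l) :: _ => pvBtHead σ bt l

-- ---- the two outcomes of the inner loop against B's transition fold ----
theorem pv_inner_done (v : List (Int × List (String × List Int))) (s : Int) :
    ∀ (l : List (String × Int)) (σ : PvSt) (bt : Bool) (σ1 : PvSt),
    pvInnerA' s l σ bt = .done σ1 → pvBtHead σ bt l →
    (∀ F, pvGoB v F s l σ = σ1) ∧ σ1.ons = σ.ons ∧ σ1.cls = σ.cls := by
  intro l
  induction l with
  | nil =>
    intro σ bt σ1 hres _
    simp [pvInnerA'] at hres
    subst hres
    exact ⟨fun F => by rw [pvGoB], rfl, rfl⟩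
  | cons x rest ih =>
    intro σ bt σ1 hres hbt
    rcases x with ⟨a, t⟩
    rw [pvInnerA'] at hres
    by_cases hg : t ∉ σ.ons ∧ t ∉ σ.cls ∧ bt = false
    · rw [if_pos hg] at hres; exact absurd hres (by simp)
    · rw [if_neg hg] at hres
      have hgo : ¬ (t ∉ σ.ons ∧ t ∉ σ.cls) := by
        intro hc
        cases bt with
        | false => exact hg ⟨hc.1, hc.2, rfl⟩
        | true =>
          rcases hbt rfl with h0 | ⟨a0, t0, l0, heq, hcls⟩
          · exact absurd h0 (by simp)
          · cases heq with
            | refl => exact hc.2 hcls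
      rcases ih (pvHandle σ s a t) false σ1 hres (by intro h; exact absurd h (by simp)) with
        ⟨hgoF, hons, hcls⟩
      refine ⟨fun F => ?_, by rw [hons, pvHandle_ons], by rw [hcls, pvHandle_cls]⟩
      cases F with
      | zero => rw [pvGoB, if_neg hgo]; exact hgoF 0
      | succ F' => rw [pvGoB, if_neg hgo]; exact hgoF (F' + 1)

theorem pv_inner_push (v : List (Int × List (String × List Int))) (s : Int) :
    ∀ (l : List (String × Int)) (σ : PvSt) (bt : Bool) (t : Int) (l' : List (String × Int)) (σ1 : PvSt),
    pvInnerA' s l σ bt = .push t l' σ1 → pvBtHead σ bt l →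
    (∃ a l'', l' = (a, t) :: l'') ∧ σ1.ons = σ.ons ∧ σ1.cls = σ.cls ∧
      t ∉ σ1.ons ∧ t ∉ σ1.cls ∧
      (∀ a' t', (a', t') ∈ l' → (a', t') ∈ l) ∧
      (∀ F, pvGoB v F s l σ = pvGoB v F s l' σ1) := by
  intro l
  induction l with
  | nil =>
    intro σ bt t l' σ1 hres _
    simp [pvInnerA'] at hres
  | cons x rest ih =>
    intro σ bt t l' σ1 hres hbt
    rcases x with ⟨a0, t0⟩
    rw [pvInnerA'] at hres
    by_cases hg : t0 ∉ σ.ons ∧ t0 ∉ σ.cls ∧ bt = false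
    · rw [if_pos hg] at hres
      injection hres with h1 h2 h3
      subst h1; subst h2; subst h3
      exact ⟨⟨a0, rest, rfl⟩, rfl, rfl, hg.1, hg.2.1, fun a' t' h => h, fun F => rfl⟩
    · rw [if_neg hg] at hres
      have hgo : ¬ (t0 ∉ σ.ons ∧ t0 ∉ σ.cls) := by
        intro hc
        cases bt with
        | false => exact hg ⟨hc.1, hc.2, rfl⟩
        | true =>
          rcases hbt rfl with h0 | ⟨a1, t1, l1, heq, hcls⟩
          · exact absurd h0 (by simp)
          · cases heq with
            | refl => exact hc.2 hcls
      rcases ih (pvHandle σ s a0 t0) false t l' σ1 hres (by intro h; exact absurd h (by simp)) with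
        ⟨hhead, hons, hcls, hto, htc, hsub, hgoF⟩
      refine ⟨hhead, by rw [hons, pvHandle_ons], by rw [hcls, pvHandle_cls], hto, htc,
        fun a' t' h => List.mem_cons_of_mem _ (hsub a' t' h), fun F => ?_⟩
      cases F with
      | zero => rw [pvGoB, if_neg hgo]; exact hgoF 0
      | succ F' => rw [pvGoB, if_neg hgo]; exact hgoF (F' + 1)

-- ---- the simulation: A's machine computes B's recursion ----
theorem pv_sim (v : List (Int × List (String × List Int))) (U : List Int)
    (HU : ∀ s a t, (a, t) ∈ pvTargets v s → t ∈ U) :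
    ∀ (fA : Nat) (frames : List (Int × List (String × Int))) (σ : PvSt) (bt : Bool) (F : Nat),
    pvInvT U frames → pvChain frames → pvBtInv σ bt frames →
    2 * pvPool U σ + frames.length ≤ fA → pvPool U σ < F →
    pvMachA' v fA frames σ bt = (pvContB v F frames σ).dir := by
  intro fA
  induction fA with
  | zero =>
    intro frames σ bt F _ _ _ hb _
    cases frames with
    | nil => rfl
    | cons fr rest => simp at hb
  | succ fA ih =>
    intro frames σ bt F hInvT hChain hBt hb hF
    cases frames with
    | nil => rfl
    | cons fr rest =>
      rcases fr with ⟨s, l⟩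
      rw [pvMachA']
      cases hres : pvInnerA' s l σ bt with
      | done σ1 =>
        simp only []
        rcases pv_inner_done v s l σ bt σ1 hres hBt with ⟨hgo, hons, hcls⟩
        have hpool1 : pvPool U σ1 = pvPool U σ := pvPool_congr hons hcls
        rw [ih rest (pvClose s σ1) true (F + 1) ?_ ?_ ?_ ?_ ?_]
        · show _ = (pvContB v F ((s, l) :: rest) σ).dir
          rw [pvContB, hgo F]
        · intro sl hsl; exact hInvT sl (List.mem_cons_of_mem _ hsl)
        · cases rest with
          | nil => trivial
          | cons fr2 rest2 =>
            rcases fr2 with ⟨s2, l2⟩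
            exact (hChain).2
        · cases rest with
          | nil => trivial
          | cons fr2 rest2 =>
            rcases fr2 with ⟨s2, l2⟩
            rcases (hChain).1 with ⟨a2, l2', hl2⟩
            intro _
            right
            exact ⟨a2, s, l2', hl2, by rw [pvClose_cls]; exact pv_mem_add_self⟩
        · have := pvPool_close_le U s σ1
          simp only [List.length_cons] at hb
          omega
        · have := pvPool_close_le U s σ1
          omega
      | push t l' σ1 =>
        simp only []
        rcases pv_inner_push v s l σ bt t l' σ1 hres hBt with
          ⟨⟨a, l'', hl'⟩, hons, hcls, hto, htc, hsub, hgoF⟩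
        have htU : t ∈ U := by
          refine hInvT (s, l) (List.mem_cons_self) a t ?_
          exact hsub a t (by rw [hl']; exact List.mem_cons_self)
        have hpool1 : pvPool U σ1 = pvPool U σ := pvPool_congr hons hcls
        have hpool2 : pvPool U { σ1 with ons := PySem.Set.add σ1.ons t } < pvPool U σ := by
          rw [← hpool1]; exact pvPool_add_lt htU hto htc
        obtain ⟨F', rfl⟩ : ∃ F', F = F' + 1 := ⟨F - 1, by omega⟩
        rw [ih ((t, (pvTargets v t).reverse) :: (s, l') :: rest)
              { σ1 with ons := PySem.Set.add σ1.ons t } false F' ?_ ?_ ?_ ?_ ?_]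
        · -- both sides compute the same pvContB value
          -- σ2 is the state in which the pushed state t is explored; σ3 the state after that visit
          set σ2 := { σ1 with ons := PySem.Set.add σ1.ons t } with hσ2
          set σ3 := pvVisitB v (F' + 1) t σ2 with hσ3def
          have hσ3 : pvClose t (pvGoB v F' t (pvTargets v t).reverse σ2) = σ3 := by
            rw [hσ3def, pvVisitB]
          have hTcls : t ∈ σ3.cls := by
            rw [hσ3def, pvVisitB, pvClose_cls]; exact pv_mem_add_self
          have lhs1 : pvGoB v (F' + 1) s l σ
              = pvGoB v (F' + 1) s l'' (pvHandle σ3 s a t) := by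
            rw [hgoF (F' + 1), hl', pvGoB, if_pos ⟨hto, htc⟩, hσ3def]
          have rhs1 : pvGoB v (F' + 1) s l' σ3
              = pvGoB v (F' + 1) s l'' (pvHandle σ3 s a t) := by
            rw [hl', pvGoB, if_neg (fun hc => hc.2 hTcls)]
          show (pvContB v F' ((t, (pvTargets v t).reverse) :: (s, l') :: rest) σ2).dir
            = (pvContB v (F' + 1) ((s, l) :: rest) σ).dir
          rw [pvContB, pvContB, pvContB, hσ3, rhs1, lhs1]
        · intro sl hsl
          rcases List.mem_cons.mp hsl with rfl | hsl
          · intro a' t' h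
            exact HU t a' t' (List.mem_reverse.mp h)
          · rcases List.mem_cons.mp hsl with rfl | hsl
            · intro a' t' h
              exact hInvT (s, l) List.mem_cons_self a' t' (hsub a' t' h)
            · exact hInvT _ (List.mem_cons_of_mem _ hsl)
        · refine ⟨⟨a, l'', hl'⟩, ?_⟩
          cases rest with
          | nil => trivial
          | cons fr2 rest2 =>
            rcases fr2 with ⟨s2, l2⟩
            exact hChain
        · intro h; exact absurd h (by simp)
        · simp only [List.length_cons] at hb ⊢
          omega
        · omega

-- ===== the final assembly =====
theorem pv_main (h_ : List Int) (v : List (Int × List (String × List Int))) (hpre : h_ ≠ []) :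
    cmc_find_direct_path_actions h_ v = cmc_find_direct_path_actions_alt h_ v := by
  cases h_ with
  | nil => exact absurd rfl hpre
  | cons x hs =>
    have hget : PySem.List.pyGet? (x :: hs) 0 = some x := by
      simp [pysem]
    unfold cmc_find_direct_path_actions cmc_find_direct_path_actions_alt
    rw [hget]
    show pvMachA v (2 * (pvStateU (x :: hs) v).length + 2) [(x, pvTargets v x)]
        ⟨PySem.Set.empty, PySem.Set.empty, PySem.Set.empty, PySem.Set.empty,
          PySem.Set.add PySem.Set.empty x⟩ false
      = (pvVisitB v ((pvStateU (x :: hs) v).length + 1) x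
        ⟨PySem.Set.empty, PySem.Set.empty, PySem.Set.empty, PySem.Set.empty,
          PySem.Set.add PySem.Set.empty x⟩).dir
    have hxU : x ∈ pvStateU (x :: hs) v := by
      unfold pvStateU; exact List.mem_append_left _ List.mem_cons_self
    have hpool : pvPool (pvStateU (x :: hs) v)
        ⟨PySem.Set.empty, PySem.Set.empty, PySem.Set.empty, PySem.Set.empty,
          PySem.Set.add PySem.Set.empty x⟩ < (pvStateU (x :: hs) v).length := by
      unfold pvPool
      refine List.length_filter_lt_length_iff_exists.mpr ⟨x, hxU, ?_⟩
      simp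
    have hmap : pvMapRev [(x, pvTargets v x)] = [(x, (pvTargets v x).reverse)] := rfl
    rw [pvMachA_eq, hmap]
    rw [pv_sim v (pvStateU (x :: hs) v) (fun s a t h => pv_targets_mem_U (x :: hs) v s a t h)
      (2 * (pvStateU (x :: hs) v).length + 2) [(x, (pvTargets v x).reverse)] _ false
      (pvStateU (x :: hs) v).length ?_ ?_ ?_ ?_ ?_]
    · rw [pvContB, pvContB, pvVisitB]
    · intro sl hsl
      rcases List.mem_cons.mp hsl with rfl | hsl
      · intro a t h
        exact pv_targets_mem_U (x :: hs) v x a t (List.mem_reverse.mp h)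
      · exact absurd hsl (List.not_mem_nil)
    · trivial
    · intro h; exact absurd h (by simp)
    · simp only [List.length_cons, List.length_nil]
      omega
    · exact hpool

-- ===== VERDICT (by name: the statement is the Claim_ definition above) =====
theorem cmc_find_direct_path_actions_spec : Claim_equal_cmc_find_direct_path_actions := by
  unfold Claim_equal_cmc_find_direct_path_actions
  intro h_ v _ hpre
  unfold Spec_cmc_find_direct_path_actions
  exact pv_main h_ v hpre
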